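-- pv_equiv track=rewrite | github.com/AlexGhiti/sort_scan_image | sort_scan_image.py | svm_vector_list_word
-- ===== SOURCE A (Python) =====
-- def svm_vector_list_word(dictionary, list_content_word):
--     vect_res = {}
--
--     for dict_word in dictionary:
--         vect_res[dict_word] = 0
--         for word in list_content_word:
--             if dict_word in word:
--                 vect_res[dict_word] += 1
--
--     return vect_res
-- ===== SOURCE B (Python) =====
-- def svm_vector_list_word(dictionary, list_content_word):
--     # Precompute, in one pass over the content words, how many words contain
--     # each distinct substring; then each dictionary word is a single lookup.
--     counts = {}
--     for word in list_content_word: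
--         n = len(word)
--         subs = {word[i:j] for i in range(n + 1) for j in range(i, n + 1)}
--         for s in subs:
--             counts[s] = counts.get(s, 0) + 1
--     return {d: counts.get(d, 0) for d in dictionary}
-- ===== Notes on version B (the rewrite author's own statement) =====
-- stated objective: faster
-- what changed: Instead of scanning every content word for every dictionary word, B builds once a counter over each content word's distinct substrings and then answers each dictionary word by a single hash lookup.
import Mathlib
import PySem

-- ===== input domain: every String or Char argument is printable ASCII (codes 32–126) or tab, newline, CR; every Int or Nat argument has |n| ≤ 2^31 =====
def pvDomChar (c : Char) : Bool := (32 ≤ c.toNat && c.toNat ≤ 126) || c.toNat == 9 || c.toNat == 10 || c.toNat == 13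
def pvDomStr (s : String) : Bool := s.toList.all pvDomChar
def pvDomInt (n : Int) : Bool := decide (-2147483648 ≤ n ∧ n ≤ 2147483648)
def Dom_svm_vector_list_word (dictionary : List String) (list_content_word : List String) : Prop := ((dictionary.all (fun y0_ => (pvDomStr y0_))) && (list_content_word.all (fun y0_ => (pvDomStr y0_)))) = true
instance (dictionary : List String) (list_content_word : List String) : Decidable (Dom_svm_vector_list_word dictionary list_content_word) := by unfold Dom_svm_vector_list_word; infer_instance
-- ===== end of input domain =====

-- B replaces A's per-dictionary-word scan of all content words by a counter over each
-- content word's distinct substrings built once, then one lookup per dictionary word (faster).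


-- ===== PORT A =====
def svm_vector_list_word (dictionary : List String) (list_content_word : List String) : List (String × Int) :=
  (dictionary.foldl
    (fun vect_res dict_word =>
      list_content_word.foldl
        (fun v word =>
          if PySem.Str.isIn dict_word word then v.insert dict_word (v.getD dict_word 0 + 1) else v)
        (vect_res.insert dict_word 0))
    PySem.Dict.empty).items

-- ===== PORT B =====
-- {word[i:j] for i in range(n+1) for j in range(i, n+1)}
def pvSubs (word : String) : PySem.Set String :=
  PySem.Set.ofList
    ((PySem.List.pyRange 0 (PySem.Str.len word + 1)).flatMap (fun i =>
      (PySem.List.pyRange i (PySem.Str.len word + 1)).map (fun j =>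
        PySem.Str.slice word (some i) (some j))))

def svm_vector_list_word_alt (dictionary : List String) (list_content_word : List String) : List (String × Int) :=
  let counts := list_content_word.foldl
    (fun c word => (pvSubs word).foldl (fun c s => c.insert s (c.getD s 0 + 1)) c)
    PySem.Dict.empty
  (dictionary.foldl (fun r d => r.insert d (counts.getD d 0)) PySem.Dict.empty).items

-- ===== PRECONDITION & SPEC =====
def Spec_svm_vector_list_word (dictionary : List String) (list_content_word : List String) (out : List (String × Int)) : Prop := out = svm_vector_list_word_alt dictionary list_content_word
instance (dictionary : List String) (list_content_word : List String) (out : List (String × Int)) : Decidable (Spec_svm_vector_list_word dictionary list_content_word out) := by unfold Spec_svm_vector_list_word; infer_instance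

-- ===== CLAIM (what is proved, stated in full; the proofs are below) =====
def Claim_equal_svm_vector_list_word : Prop := ∀ (dictionary : List String) (list_content_word : List String), Dom_svm_vector_list_word dictionary list_content_word → Spec_svm_vector_list_word dictionary list_content_word (svm_vector_list_word dictionary list_content_word)

-- ===== LEMMAS AND PROOFS =====

-- membership in the substring set is exactly Python's `d in w`
theorem mem_pvSubs_iff (d w : String) : d ∈ pvSubs w ↔ PySem.Str.isIn d w = true := by
  rw [PySem.Str.isIn_iff_infix]
  unfold pvSubs
  rw [PySem.Set.mem_ofList]
  simp only [List.mem_flatMap, List.mem_map, PySem.List.mem_pyRange_one, PySem.Str.len_eq]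
  constructor
  · rintro ⟨i, ⟨hi0, _⟩, j, ⟨hij, _⟩, hslice⟩
    have hd : d.toList = (w.toList.drop i.toNat).take (j.toNat - i.toNat) := by
      rw [← hslice, PySem.Str.toList_slice, PySem.Chars.slice_eq_listSlice,
        PySem.List.slice_toNat _ hi0 (le_trans hi0 hij)]
    rw [hd]
    exact ((List.take_prefix _ _).isInfix).trans ((List.drop_suffix _ _).isInfix)
  · rintro ⟨s, t, hst⟩
    have hlen : s.length + d.toList.length ≤ w.toList.length := by
      have := congrArg List.length hst
      simp only [List.length_append] at this
      omega
    refine ⟨(s.length : Int), ⟨by omega, by omega⟩,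
      (s.length : Int) + (d.toList.length : Int), ⟨by omega, by omega⟩, ?_⟩
    apply String.toList_inj.mp
    rw [PySem.Str.toList_slice, PySem.Chars.slice_eq_listSlice,
      PySem.List.slice_toNat _ (by positivity) (by positivity)]
    have h1 : ((s.length : Int) + (d.toList.length : Int)).toNat = s.length + d.toList.length := by
      omega
    have h2 : ((s.length : Int)).toNat = s.length := by omega
    rw [h1, h2, ← hst]
    simp

-- the counter built by B's first loop counts, for each key, the content words containing it
theorem counts_getD (ws : List String) (c : PySem.Dict String Int) (d : String) :
    (ws.foldl (fun c word => (pvSubs word).foldl (fun c s => c.insert s (c.getD s 0 + 1)) c) c).getD d 0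
      = c.getD d 0 + (ws.countP (fun w => PySem.Str.isIn d w) : Int) := by
  induction ws generalizing c with
  | nil => simp
  | cons w ws ih =>
    simp only [List.foldl_cons, ih, PySem.Dict.getD_foldl_insert_add_one, List.countP_cons]
    have hcnt : List.count d (pvSubs w) = if PySem.Str.isIn d w = true then 1 else 0 := by
      by_cases h : d ∈ pvSubs w
      · rw [if_pos ((mem_pvSubs_iff d w).mp h)]
        exact List.count_eq_one_of_mem (PySem.Set.nodup_ofList _) h
      · rw [if_neg (by simpa [mem_pvSubs_iff] using h)]
        exact List.count_eq_zero_of_not_mem h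
    rw [hcnt]
    push_cast
    split_ifs with h <;> ring

-- A's inner loop over the content words, started at value a for key dw, ends at a + count
theorem innerA (dw : String) (ws : List String) (v : PySem.Dict String Int) (a : Int) :
    ws.foldl (fun v word => if PySem.Str.isIn dw word then v.insert dw (v.getD dw 0 + 1) else v)
      (v.insert dw a)
      = v.insert dw (a + (ws.countP (fun w => PySem.Str.isIn dw w) : Int)) := by
  induction ws generalizing a with
  | nil => simp
  | cons w ws ih =>
    simp only [List.foldl_cons, List.countP_cons]
    by_cases h : PySem.Str.isIn dw w = true
    · rw [if_pos h, PySem.Dict.getD_insert_self, PySem.Dict.insert_insert_self, ih]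
      rw [if_pos h]
      congr 1
      push_cast
      ring
    · rw [if_neg h, ih, if_neg h]
      simp

-- ===== VERDICT (by name: the statement is the Claim_ definition above) =====
theorem svm_vector_list_word_spec : Claim_equal_svm_vector_list_word := by
  intro dictionary list_content_word _
  unfold Spec_svm_vector_list_word svm_vector_list_word svm_vector_list_word_alt
  congr 1
  apply PySem.List.foldl_congr_mem
  intro acc dw _
  rw [innerA, counts_getD, PySem.Dict.getD_empty]
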